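-- pv_equiv track=rewrite | github.com/AlanJui/ho-lok-ue-tools | han_ji_dict/ban_phing_lo_ma_ji.py | get_primary_vowel
-- ===== SOURCE A (Python) =====
-- def get_primary_vowel(syllable):
--     """Get primary vowel based on the rules."""
--     vowels = [
--         'a',
--         'e',
--         'o',
--         'i',
--         'u',
--         'm',
--         'n',
--     ]
--     primary_vowel = None
--     for vowel in vowels:
--         if vowel in syllable:
--             if primary_vowel is None or vowels.index(vowel) < vowels.index(
--                 primary_vowel
--             ):
--                 primary_vowel = vowel
--     return primary_vowel
-- ===== SOURCE B (Python) =====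
-- def get_primary_vowel(syllable):
--     """Get primary vowel based on the rules."""
--     rank = {'a': 0, 'e': 1, 'o': 2, 'i': 3, 'u': 4, 'm': 5, 'n': 6}
--     best = None  # (rank, vowel) of the best vowel seen so far
--     for ch in syllable:
--         r = rank.get(ch)
--         if r is not None and (best is None or r < best[0]):
--             best = (r, ch)
--     return best[1] if best is not None else None
-- ===== Notes on version B (the rewrite author's own statement) =====
-- stated objective: idiomatic
-- what changed: Replaces the scan over the vowel list with repeated substring tests and list.index calls by a single pass over the syllable's characters keeping the best (lowest-rank) vowel via a precomputed rank dict.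
import Mathlib
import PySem

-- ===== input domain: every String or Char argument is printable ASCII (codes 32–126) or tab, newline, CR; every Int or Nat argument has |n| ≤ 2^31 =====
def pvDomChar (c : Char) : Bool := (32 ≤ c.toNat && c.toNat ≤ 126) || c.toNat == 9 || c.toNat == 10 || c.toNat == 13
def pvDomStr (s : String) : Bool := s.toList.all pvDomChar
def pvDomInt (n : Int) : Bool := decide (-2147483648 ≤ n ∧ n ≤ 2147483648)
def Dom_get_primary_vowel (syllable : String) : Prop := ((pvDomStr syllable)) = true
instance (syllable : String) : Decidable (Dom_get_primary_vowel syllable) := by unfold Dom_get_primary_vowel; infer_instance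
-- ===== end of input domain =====

-- B replaces A's scan over the vowel list (substring test + list.index per vowel) by one
-- pass over the syllable's characters keeping the lowest-rank vowel via a rank dict (idiomatic).

-- ===== PORT A =====
def get_primary_vowel (syllable : String) : Option String :=
  let vowels : List String := ["a", "e", "o", "i", "u", "m", "n"]
  -- vowels.index(v) via PySem.List.index?; both arguments are always members of `vowels`,
  -- so .getD 0 never fires and Python's ValueError is unreachable.
  vowels.foldl (fun primary_vowel vowel =>
    if PySem.Str.isIn vowel syllable then
      match primary_vowel with
      | none => some vowel
      | some p =>
        if (PySem.List.index? vowels vowel).getD 0 < (PySem.List.index? vowels p).getD 0 then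
          some vowel
        else primary_vowel
    else primary_vowel) none

-- ===== PORT B =====
def altRank : PySem.Dict String Int :=
  PySem.Dict.mk [("a", 0), ("e", 1), ("o", 2), ("i", 3), ("u", 4), ("m", 5), ("n", 6)]

-- one loop iteration of Source B: r = rank.get(ch); conditional update of best
def altStep (best : Option (Int × String)) (ch : String) : Option (Int × String) :=
  match PySem.Dict.get? altRank ch with
  | none => best
  | some r =>
    match best with
    | none => some (r, ch)
    | some (br, _) => if r < br then some (r, ch) else best

def get_primary_vowel_alt (syllable : String) : Option String :=
  let best := syllable.toList.foldl (fun b c => altStep b (String.mk [c])) none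
  match best with
  | some (_, ch) => some ch
  | none => none

-- ===== PRECONDITION & SPEC =====
def Spec_get_primary_vowel (syllable : String) (out : Option String) : Prop := out = get_primary_vowel_alt syllable
instance (syllable : String) (out : Option String) : Decidable (Spec_get_primary_vowel syllable out) := by unfold Spec_get_primary_vowel; infer_instance

-- ===== CLAIM (what is proved, stated in full; the proofs are below) =====
def Claim_equal_get_primary_vowel : Prop := ∀ (syllable : String), Dom_get_primary_vowel syllable → Spec_get_primary_vowel syllable (get_primary_vowel syllable)

-- ===== LEMMAS AND PROOFS =====

-- "min by rank, keep the old value on ties": the semantic core of B's update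
def minO (b : Option (Int × String)) (x : Int × String) : Option (Int × String) :=
  match b with
  | none => some x
  | some (br, _) => if x.1 < br then some x else b

def mergeO (b : Option (Int × String)) (o : Option (Int × String)) : Option (Int × String) :=
  match o with
  | none => b
  | some x => minO b x

-- the lowest-rank vowel occurring in `l`, as (rank, vowel-string)
def Pmin (l : List Char) : Option (Int × String) :=
  if 'a' ∈ l then some (0, "a")
  else if 'e' ∈ l then some (1, "e")
  else if 'o' ∈ l then some (2, "o")
  else if 'i' ∈ l then some (3, "i")
  else if 'u' ∈ l then some (4, "u")
  else if 'm' ∈ l then some (5, "m")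
  else if 'n' ∈ l then some (6, "n")
  else none

theorem minO_minO (b : Option (Int × String)) (x y : Int × String) :
    minO (minO b x) y = if y.1 < x.1 then minO b y else minO b x := by
  obtain ⟨xr, xv⟩ := x; obtain ⟨yr, yv⟩ := y
  cases b with
  | none => simp [minO]
  | some p =>
    obtain ⟨br, bv⟩ := p
    simp only [minO]
    split_ifs <;> first | (simp_all; done) | (simp_all; omega) | omega

theorem mk_toList (l : List Char) : (String.mk l).toList = l :=
  Eq.symm (String.ofList_eq.mp rfl)

theorem singleton_infix {c : Char} {l : List Char} : [c] <:+: l ↔ c ∈ l := by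
  constructor
  · intro h; exact h.mem (List.mem_singleton_self c)
  · intro h
    obtain ⟨s, t, rfl⟩ := List.append_of_mem h
    exact ⟨s, t, by simp⟩

theorem chars_isIn (c : Char) (l : List Char) :
    PySem.Chars.isIn [c] l = decide (c ∈ l) := by
  by_cases h : c ∈ l
  · simp only [h, decide_true]
    exact (PySem.Chars.isIn_iff_infix _ _).mpr (singleton_infix.mpr h)
  · simp only [h, decide_false]
    rw [← Bool.not_eq_true]
    exact fun hh => h (singleton_infix.mp ((PySem.Chars.isIn_iff_infix _ _).mp hh))

theorem stepA : ∀ b, altStep b (String.mk ['a']) = minO b (0, "a") := by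
  intro b; cases b with
  | none => rfl
  | some p => obtain ⟨br, bv⟩ := p; rfl

theorem stepE : ∀ b, altStep b (String.mk ['e']) = minO b (1, "e") := by
  intro b; cases b with
  | none => rfl
  | some p => obtain ⟨br, bv⟩ := p; rfl

theorem stepO : ∀ b, altStep b (String.mk ['o']) = minO b (2, "o") := by
  intro b; cases b with
  | none => rfl
  | some p => obtain ⟨br, bv⟩ := p; rfl

theorem stepI : ∀ b, altStep b (String.mk ['i']) = minO b (3, "i") := by
  intro b; cases b with
  | none => rfl
  | some p => obtain ⟨br, bv⟩ := p; rfl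

theorem stepU : ∀ b, altStep b (String.mk ['u']) = minO b (4, "u") := by
  intro b; cases b with
  | none => rfl
  | some p => obtain ⟨br, bv⟩ := p; rfl

theorem stepM : ∀ b, altStep b (String.mk ['m']) = minO b (5, "m") := by
  intro b; cases b with
  | none => rfl
  | some p => obtain ⟨br, bv⟩ := p; rfl

theorem stepN : ∀ b, altStep b (String.mk ['n']) = minO b (6, "n") := by
  intro b; cases b with
  | none => rfl
  | some p => obtain ⟨br, bv⟩ := p; rfl

theorem mk_inj {l l' : List Char} : String.mk l = String.mk l' ↔ l = l' := by
  constructor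
  · intro h
    have := congrArg String.toList h
    simpa [mk_toList] using this
  · intro h; rw [h]

theorem stepNone (h : Char) (ha : h ≠ 'a') (he : h ≠ 'e') (ho : h ≠ 'o') (hi : h ≠ 'i')
    (hu : h ≠ 'u') (hm : h ≠ 'm') (hn : h ≠ 'n') (b : Option (Int × String)) :
    altStep b (String.mk [h]) = b := by
  have na : (String.mk ['a'] == String.mk [h]) = false :=
    beq_eq_false_iff_ne.mpr (fun e => ha ((by simpa using mk_inj.mp e : 'a' = h)).symm)
  have ne' : (String.mk ['e'] == String.mk [h]) = false :=
    beq_eq_false_iff_ne.mpr (fun e => he ((by simpa using mk_inj.mp e : 'e' = h)).symm)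
  have no : (String.mk ['o'] == String.mk [h]) = false :=
    beq_eq_false_iff_ne.mpr (fun e => ho ((by simpa using mk_inj.mp e : 'o' = h)).symm)
  have ni : (String.mk ['i'] == String.mk [h]) = false :=
    beq_eq_false_iff_ne.mpr (fun e => hi ((by simpa using mk_inj.mp e : 'i' = h)).symm)
  have nu : (String.mk ['u'] == String.mk [h]) = false :=
    beq_eq_false_iff_ne.mpr (fun e => hu ((by simpa using mk_inj.mp e : 'u' = h)).symm)
  have nm : (String.mk ['m'] == String.mk [h]) = false :=
    beq_eq_false_iff_ne.mpr (fun e => hm ((by simpa using mk_inj.mp e : 'm' = h)).symm)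
  have nn : (String.mk ['n'] == String.mk [h]) = false :=
    beq_eq_false_iff_ne.mpr (fun e => hn ((by simpa using mk_inj.mp e : 'n' = h)).symm)
  have hget : PySem.Dict.get? altRank (String.mk [h]) = none := by
    simp [altRank, PySem.Dict.get?, List.find?,
      show ("a" : String) = String.mk ['a'] from rfl,
      show ("e" : String) = String.mk ['e'] from rfl,
      show ("o" : String) = String.mk ['o'] from rfl,
      show ("i" : String) = String.mk ['i'] from rfl,
      show ("u" : String) = String.mk ['u'] from rfl,
      show ("m" : String) = String.mk ['m'] from rfl,
      show ("n" : String) = String.mk ['n'] from rfl,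
      na, ne', no, ni, nu, nm, nn]
  simp [altStep, hget]

theorem step_merge (h : Char) (t : List Char) (b : Option (Int × String)) :
    mergeO (altStep b (String.mk [h])) (Pmin t) = mergeO b (Pmin (h :: t)) := by
  by_cases ha : h = 'a'
  · subst ha
    by_cases h1 : 'a' ∈ t <;> by_cases h2 : 'e' ∈ t <;> by_cases h3 : 'o' ∈ t <;>
      by_cases h4 : 'i' ∈ t <;> by_cases h5 : 'u' ∈ t <;> by_cases h6 : 'm' ∈ t <;>
      by_cases h7 : 'n' ∈ t <;>
      simp [stepA, Pmin, mergeO, minO_minO, h1, h2, h3, h4, h5, h6, h7]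
  · by_cases he : h = 'e'
    · subst he
      by_cases h1 : 'a' ∈ t <;> by_cases h2 : 'e' ∈ t <;> by_cases h3 : 'o' ∈ t <;>
      by_cases h4 : 'i' ∈ t <;> by_cases h5 : 'u' ∈ t <;> by_cases h6 : 'm' ∈ t <;>
      by_cases h7 : 'n' ∈ t <;>
      simp [stepE, Pmin, mergeO, minO_minO, h1, h2, h3, h4, h5, h6, h7]
    · by_cases ho : h = 'o'
      · subst ho
        by_cases h1 : 'a' ∈ t <;> by_cases h2 : 'e' ∈ t <;> by_cases h3 : 'o' ∈ t <;>
      by_cases h4 : 'i' ∈ t <;> by_cases h5 : 'u' ∈ t <;> by_cases h6 : 'm' ∈ t <;>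
      by_cases h7 : 'n' ∈ t <;>
      simp [stepO, Pmin, mergeO, minO_minO, h1, h2, h3, h4, h5, h6, h7]
      · by_cases hi : h = 'i'
        · subst hi
          by_cases h1 : 'a' ∈ t <;> by_cases h2 : 'e' ∈ t <;> by_cases h3 : 'o' ∈ t <;>
      by_cases h4 : 'i' ∈ t <;> by_cases h5 : 'u' ∈ t <;> by_cases h6 : 'm' ∈ t <;>
      by_cases h7 : 'n' ∈ t <;>
      simp [stepI, Pmin, mergeO, minO_minO, h1, h2, h3, h4, h5, h6, h7]
        · by_cases hu : h = 'u'
          · subst hu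
            by_cases h1 : 'a' ∈ t <;> by_cases h2 : 'e' ∈ t <;> by_cases h3 : 'o' ∈ t <;>
      by_cases h4 : 'i' ∈ t <;> by_cases h5 : 'u' ∈ t <;> by_cases h6 : 'm' ∈ t <;>
      by_cases h7 : 'n' ∈ t <;>
      simp [stepU, Pmin, mergeO, minO_minO, h1, h2, h3, h4, h5, h6, h7]
          · by_cases hm : h = 'm'
            · subst hm
              by_cases h1 : 'a' ∈ t <;> by_cases h2 : 'e' ∈ t <;> by_cases h3 : 'o' ∈ t <;>
      by_cases h4 : 'i' ∈ t <;> by_cases h5 : 'u' ∈ t <;> by_cases h6 : 'm' ∈ t <;>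
      by_cases h7 : 'n' ∈ t <;>
      simp [stepM, Pmin, mergeO, minO_minO, h1, h2, h3, h4, h5, h6, h7]
            · by_cases hn : h = 'n'
              · subst hn
                by_cases h1 : 'a' ∈ t <;> by_cases h2 : 'e' ∈ t <;> by_cases h3 : 'o' ∈ t <;>
      by_cases h4 : 'i' ∈ t <;> by_cases h5 : 'u' ∈ t <;> by_cases h6 : 'm' ∈ t <;>
      by_cases h7 : 'n' ∈ t <;>
      simp [stepN, Pmin, mergeO, minO_minO, h1, h2, h3, h4, h5, h6, h7]
              · rw [stepNone h ha he ho hi hu hm hn]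
                have ha' : ¬('a' = h) := fun e => ha e.symm
                have he' : ¬('e' = h) := fun e => he e.symm
                have ho' : ¬('o' = h) := fun e => ho e.symm
                have hi' : ¬('i' = h) := fun e => hi e.symm
                have hu' : ¬('u' = h) := fun e => hu e.symm
                have hm' : ¬('m' = h) := fun e => hm e.symm
                have hn' : ¬('n' = h) := fun e => hn e.symm
                have hp : Pmin (h :: t) = Pmin t := by
                  simp [Pmin, List.mem_cons, ha', he', ho', hi', hu', hm', hn']
                rw [hp]

theorem loop_spec (l : List Char) (b : Option (Int × String)) :
    l.foldl (fun b c => altStep b (String.mk [c])) b = mergeO b (Pmin l) := by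
  induction l generalizing b with
  | nil => simp [Pmin, mergeO]
  | cons h t ih =>
    simp only [List.foldl_cons]
    rw [ih, step_merge]

theorem A_chain (s : String) :
    get_primary_vowel s =
      match Pmin s.toList with
      | some (_, v) => some v
      | none => none := by
  by_cases h1 : 'a' ∈ s.toList <;> by_cases h2 : 'e' ∈ s.toList <;>
    by_cases h3 : 'o' ∈ s.toList <;> by_cases h4 : 'i' ∈ s.toList <;>
    by_cases h5 : 'u' ∈ s.toList <;> by_cases h6 : 'm' ∈ s.toList <;>
    by_cases h7 : 'n' ∈ s.toList <;>
    (simp [get_primary_vowel, Pmin, chars_isIn, h1, h2, h3, h4, h5, h6, h7,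
      PySem.List.index?, List.idxOf?] <;> first | rfl | decide)

-- ===== VERDICT (by name: the statement is the Claim_ definition above) =====
theorem get_primary_vowel_spec : Claim_equal_get_primary_vowel := by
  intro s _
  unfold Spec_get_primary_vowel
  rw [A_chain]
  unfold get_primary_vowel_alt
  rw [loop_spec]
  cases hp : Pmin s.toList with
  | none => simp [mergeO]
  | some x => obtain ⟨r, v⟩ := x; simp [mergeO, minO]
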